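-- pv_equiv track=rewrite | github.com/lkshay/mAIke-oss | maike/safety/rules.py | _strip_quoted_regions
-- ===== SOURCE A (Python) =====
-- def _strip_quoted_regions(cmd: str) -> str:
--     """Replace quoted regions with spaces so operator-character detection
--     sees only unquoted text.
--
--     Mirrors shell quoting semantics: ``|`` inside ``'...'`` or ``"..."`` is
--     a literal character, not a pipe operator.  We replace each char in a
--     quoted region with a space (preserving offsets) so subsequent
--     composition checks don't false-positive on regex alternation
--     (``egrep '^(a|b)' file``) or quoted separators (``grep 'a;b' file``).
--     """
--     out: list[str] = []
--     i = 0
--     n = len(cmd)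
--     while i < n:
--         c = cmd[i]
--         if c == "\\" and i + 1 < n:
--             # Backslash escape — collapse both bytes to spaces.
--             out.append("  ")
--             i += 2
--             continue
--         if c == "'":
--             out.append(" ")
--             i += 1
--             while i < n and cmd[i] != "'":
--                 out.append(" ")
--                 i += 1
--             if i < n:
--                 out.append(" ")
--                 i += 1
--             continue
--         if c == '"':
--             out.append(" ")
--             i += 1
--             while i < n:
--                 if cmd[i] == "\\" and i + 1 < n:
--                     out.append("  ")
--                     i += 2
--                     continue
--                 if cmd[i] == '"':
--                     break
--                 out.append(" ")
--                 i += 1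
--             if i < n:
--                 out.append(" ")
--                 i += 1
--             continue
--         out.append(c)
--         i += 1
--     return "".join(out)
-- ===== SOURCE B (Python) =====
-- def _strip_quoted_regions(cmd: str) -> str:
--     """Single forward pass with an explicit 5-state DFA (normal, escape,
--     single-quote, double-quote, double-quote-escape) instead of nested
--     index loops; a trailing lone backslash is fixed up after the loop."""
--     out = []
--     state = 'N'
--     for c in cmd:
--         if state == 'N':
--             if c == '\\':
--                 state = 'NE'
--             elif c == "'":
--                 state = 'S'
--                 out.append(' ')
--             elif c == '"':
--                 state = 'D'
--                 out.append(' ')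
--             else:
--                 out.append(c)
--         elif state == 'NE':
--             out.append('  ')
--             state = 'N'
--         elif state == 'S':
--             if c == "'":
--                 state = 'N'
--             out.append(' ')
--         elif state == 'D':
--             if c == '\\':
--                 state = 'DE'
--             elif c == '"':
--                 state = 'N'
--                 out.append(' ')
--             else:
--                 out.append(' ')
--         else:  # 'DE'
--             out.append('  ')
--             state = 'D'
--     if state == 'NE':
--         out.append('\\')
--     elif state == 'DE':
--         out.append(' ')
--     return ''.join(out)
-- ===== Notes on version B (the rewrite author's own statement) =====
-- stated objective: alternative
-- what changed: Replaced A's nested index-based while loops (outer scan plus separate inner loops for single- and double-quoted regions with two-byte escape skips) by a single one-pass character DFA with five explicit states and an after-loop fixup for a pending backslash.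
import Mathlib
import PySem

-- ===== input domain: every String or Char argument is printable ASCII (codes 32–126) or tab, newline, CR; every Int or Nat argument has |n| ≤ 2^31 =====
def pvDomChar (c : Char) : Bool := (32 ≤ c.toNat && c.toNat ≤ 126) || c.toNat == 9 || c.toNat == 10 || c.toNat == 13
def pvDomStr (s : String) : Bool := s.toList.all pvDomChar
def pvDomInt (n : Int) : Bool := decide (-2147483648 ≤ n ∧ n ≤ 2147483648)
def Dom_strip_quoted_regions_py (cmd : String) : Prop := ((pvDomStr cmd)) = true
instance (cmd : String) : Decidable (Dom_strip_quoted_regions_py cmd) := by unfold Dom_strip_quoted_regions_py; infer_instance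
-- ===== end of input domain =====

-- B replaces A's nested index-based while loops by a single one-pass 5-state DFA with an
-- end-of-input fixup for a pending backslash (objective: alternative decomposition, same cost).

-- ===== PORT A =====
-- A's outer while loop is aMain; its two inner while loops (single- and double-quoted
-- regions) are aSingle/aDouble, advancing over the list exactly as the Python advances i.
mutual
def aMain : List Char → List Char
  | [] => []
  | c :: rest =>
    if c = '\\' then
      match rest with
      | _ :: rest' => ' ' :: ' ' :: aMain rest'        -- i+1 < n: collapse both bytes
      | [] => c :: aMain []                            -- trailing backslash falls through to `out.append(c)`
    else if c = '\'' then ' ' :: aSingle rest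
    else if c = '"' then ' ' :: aDouble rest
    else c :: aMain rest
  termination_by l => l.length
  decreasing_by all_goals simp

def aSingle : List Char → List Char
  | [] => []                                           -- unterminated region: i = n, done
  | c :: rest => if c = '\'' then ' ' :: aMain rest else ' ' :: aSingle rest
  termination_by l => l.length
  decreasing_by all_goals simp

def aDouble : List Char → List Char
  | [] => []
  | c :: rest =>
    if c = '\\' then
      match rest with
      | _ :: rest' => ' ' :: ' ' :: aDouble rest'
      | [] => ' ' :: aDouble []                        -- lone backslash before end: plain char in the region
    else if c = '"' then ' ' :: aMain rest
    else ' ' :: aDouble rest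
  termination_by l => l.length
  decreasing_by all_goals simp
end

def strip_quoted_regions_py (cmd : String) : String := String.ofList (aMain cmd.toList)

-- ===== PORT B =====
-- B's DFA states (normal / normal-escape / single-quote / double-quote / double-quote-escape).
inductive BSt | N | NE | S | D | DE
deriving DecidableEq, Repr

-- B's for-loop over the characters, carrying the state and the `out` accumulator;
-- the [] case is B's after-the-loop fixup for a pending backslash.
def bLoop : BSt → List Char → List Char → List Char
  | st, out, [] =>
    match st with
    | .NE => out ++ ['\\']
    | .DE => out ++ [' ']
    | _ => out
  | st, out, c :: rest =>
    match st with
    | .N =>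
      if c = '\\' then bLoop .NE out rest
      else if c = '\'' then bLoop .S (out ++ [' ']) rest
      else if c = '"' then bLoop .D (out ++ [' ']) rest
      else bLoop .N (out ++ [c]) rest
    | .NE => bLoop .N (out ++ [' ', ' ']) rest
    | .S => if c = '\'' then bLoop .N (out ++ [' ']) rest else bLoop .S (out ++ [' ']) rest
    | .D =>
      if c = '\\' then bLoop .DE out rest
      else if c = '"' then bLoop .N (out ++ [' ']) rest
      else bLoop .D (out ++ [' ']) rest
    | .DE => bLoop .D (out ++ [' ', ' ']) rest

def strip_quoted_regions_py_alt (cmd : String) : String := String.ofList (bLoop .N [] cmd.toList)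

-- ===== PRECONDITION & SPEC =====
def Spec_strip_quoted_regions_py (cmd : String) (out : String) : Prop := out = strip_quoted_regions_py_alt cmd
instance (cmd : String) (out : String) : Decidable (Spec_strip_quoted_regions_py cmd out) := by unfold Spec_strip_quoted_regions_py; infer_instance

-- ===== CLAIM (what is proved, stated in full; the proofs are below) =====
def Claim_equal_strip_quoted_regions_py : Prop := ∀ (cmd : String), Dom_strip_quoted_regions_py cmd → Spec_strip_quoted_regions_py cmd (strip_quoted_regions_py cmd)

-- ===== LEMMAS AND PROOFS =====

-- Unfolding lemmas for A's mutual recursion.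
theorem aMain_nil : aMain [] = [] := by rw [aMain.eq_def]
theorem aSingle_nil : aSingle [] = [] := by rw [aSingle.eq_def]
theorem aDouble_nil : aDouble [] = [] := by rw [aDouble.eq_def]
theorem aMain_bs2 (d : Char) (r : List Char) : aMain ('\\' :: d :: r) = ' ' :: ' ' :: aMain r := by
  conv_lhs => rw [aMain.eq_def]
  simp
theorem aMain_bs1 : aMain ['\\'] = ['\\'] := by
  conv_lhs => rw [aMain.eq_def]
  simp [aMain_nil]
theorem aMain_sq (r : List Char) : aMain ('\'' :: r) = ' ' :: aSingle r := by
  conv_lhs => rw [aMain.eq_def]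
  simp
theorem aMain_dq (r : List Char) : aMain ('"' :: r) = ' ' :: aDouble r := by
  conv_lhs => rw [aMain.eq_def]
  simp
theorem aMain_other (c : Char) (r : List Char) (h1 : c ≠ '\\') (h2 : c ≠ '\'') (h3 : c ≠ '"') :
    aMain (c :: r) = c :: aMain r := by
  conv_lhs => rw [aMain.eq_def]
  simp [h1, h2, h3]
theorem aSingle_close (r : List Char) : aSingle ('\'' :: r) = ' ' :: aMain r := by
  conv_lhs => rw [aSingle.eq_def]
  simp
theorem aSingle_other (c : Char) (r : List Char) (h : c ≠ '\'') : aSingle (c :: r) = ' ' :: aSingle r := by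
  conv_lhs => rw [aSingle.eq_def]
  simp [h]
theorem aDouble_bs2 (d : Char) (r : List Char) : aDouble ('\\' :: d :: r) = ' ' :: ' ' :: aDouble r := by
  conv_lhs => rw [aDouble.eq_def]
  simp
theorem aDouble_bs1 : aDouble ['\\'] = [' '] := by
  conv_lhs => rw [aDouble.eq_def]
  simp [aDouble_nil]
theorem aDouble_close (r : List Char) : aDouble ('"' :: r) = ' ' :: aMain r := by
  conv_lhs => rw [aDouble.eq_def]
  simp
theorem aDouble_other (c : Char) (r : List Char) (h1 : c ≠ '\\') (h2 : c ≠ '"') :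
    aDouble (c :: r) = ' ' :: aDouble r := by
  conv_lhs => rw [aDouble.eq_def]
  simp [h1, h2]

-- The accumulator of B's loop only ever receives appended output.
theorem bLoop_acc (l : List Char) : ∀ (st : BSt) (out : List Char),
    bLoop st out l = out ++ bLoop st [] l := by
  induction l with
  | nil => intro st out; cases st <;> simp [bLoop]
  | cons c rest ih =>
    intro st out
    cases st <;> simp only [bLoop] <;> (try split_ifs) <;>
      (conv_lhs => rw [ih]) <;> (conv_rhs => rw [ih]) <;> simp [List.append_assoc]

-- B's DFA run from states N/S/D computes A's outer / single-quote / double-quote loops.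
theorem ab_agree : ∀ (n : ℕ) (l : List Char), l.length ≤ n →
    bLoop .N [] l = aMain l ∧ bLoop .S [] l = aSingle l ∧ bLoop .D [] l = aDouble l := by
  intro n
  induction n with
  | zero =>
    intro l hl
    have h0 : l = [] := List.eq_nil_of_length_eq_zero (Nat.le_zero.mp hl)
    subst h0
    simp [bLoop, aMain_nil, aSingle_nil, aDouble_nil]
  | succ n ih =>
    intro l hl
    cases l with
    | nil => simp [bLoop, aMain_nil, aSingle_nil, aDouble_nil]
    | cons c rest =>
      have hrest : rest.length ≤ n := by simpa using hl
      refine ⟨?_, ?_, ?_⟩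
      · -- state N ↔ A's outer loop
        by_cases hb : c = '\\'
        · subst hb
          cases rest with
          | nil => rw [aMain_bs1]; rfl
          | cons d rest' =>
            have h' : rest'.length ≤ n := le_trans (by simp) hrest
            rw [aMain_bs2, ← (ih rest' h').1]
            simp [bLoop]
            try conv_lhs => rw [bLoop_acc]
            try simp
        · by_cases hs : c = '\''
          · subst hs
            rw [aMain_sq, ← (ih rest hrest).2.1]
            simp [bLoop]
            try conv_lhs => rw [bLoop_acc]
            try simp
          · by_cases hd : c = '"'
            · subst hd
              rw [aMain_dq, ← (ih rest hrest).2.2]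
              simp [bLoop]
              try conv_lhs => rw [bLoop_acc]
              try simp
            · rw [aMain_other c rest hb hs hd, ← (ih rest hrest).1]
              simp only [bLoop]
              rw [if_neg hb, if_neg hs, if_neg hd]
              conv_lhs => rw [bLoop_acc]
              simp
      · -- state S ↔ A's single-quote loop
        by_cases hs : c = '\''
        · subst hs
          rw [aSingle_close, ← (ih rest hrest).1]
          simp [bLoop]
          try conv_lhs => rw [bLoop_acc]
          try simp
        · rw [aSingle_other c rest hs, ← (ih rest hrest).2.1]
          simp only [bLoop]
          rw [if_neg hs]
          conv_lhs => rw [bLoop_acc]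
          simp
      · -- state D ↔ A's double-quote loop
        by_cases hb : c = '\\'
        · subst hb
          cases rest with
          | nil => rw [aDouble_bs1]; rfl
          | cons d rest' =>
            have h' : rest'.length ≤ n := le_trans (by simp) hrest
            rw [aDouble_bs2, ← (ih rest' h').2.2]
            simp [bLoop]
            try conv_lhs => rw [bLoop_acc]
            try simp
        · by_cases hd : c = '"'
          · subst hd
            rw [aDouble_close, ← (ih rest hrest).1]
            simp [bLoop]
            try conv_lhs => rw [bLoop_acc]
            try simp
          · rw [aDouble_other c rest hb hd, ← (ih rest hrest).2.2]
            simp only [bLoop]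
            rw [if_neg hb, if_neg hd]
            conv_lhs => rw [bLoop_acc]
            simp

-- ===== VERDICT (by name: the statement is the Claim_ definition above) =====
theorem strip_quoted_regions_py_spec : Claim_equal_strip_quoted_regions_py := by
  intro cmd _
  unfold Spec_strip_quoted_regions_py strip_quoted_regions_py strip_quoted_regions_py_alt
  rw [(ab_agree cmd.toList.length cmd.toList le_rfl).1]
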